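-- pv_equiv track=rewrite | github.com/pypi-data/pypi-mirror-70 | packages/deepomatic-oef/deepomatic-oef-0.6.2.tar.gz/deepomatic-oef-0.6.2/deepomatic/oef/utils/class_helpers.py | split_path_into_module_and_class
-- ===== SOURCE A (Python) =====
-- def split_path_into_module_and_class(path):
--     """
--     By convention, classes start with a capital letter and modules only have small letters.
--     We use that to split a path into module and class
--     """
--     module = []
--     classes = []
--     path = path.split('.')
--     for i, part in enumerate(path):
--         if part[0].isupper():
--             classes = path[i:]
--             break
--         module.append(part)
--     module = '.'.join(module)
--     return module, classes
-- ===== SOURCE B (Python) =====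
-- def split_path_into_module_and_class(path):
--     # Character-level state machine: walk the raw string once; a component start is
--     # position 0 or any position right after a '.'. At the first component-start
--     # uppercase letter, the module is the raw prefix (minus the separating dot) and
--     # only the class half ever gets split.
--     at_start = True
--     for j, ch in enumerate(path):
--         if ch.isupper() and at_start:
--             return (path[:j - 1] if j else ''), path[j:].split('.')
--         at_start = ch == '.'
--     return path, []
-- ===== Notes on version B (the rewrite author's own statement) =====
-- stated objective: alternative
-- what changed: B replaces A's split-into-components-then-accumulate loop by a single character-level state machine over the raw string (a position right after '.' is a component start): it finds the first component-start uppercase letter and slices the original string, never splitting the module half at all.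
-- outside the precondition, e.g. on split_path_into_module_and_class('a..B'): A raises IndexError, B returns ('a.', ['B']); on split_path_into_module_and_class('.'): A raises IndexError, B returns ('.', [])
import Mathlib
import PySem

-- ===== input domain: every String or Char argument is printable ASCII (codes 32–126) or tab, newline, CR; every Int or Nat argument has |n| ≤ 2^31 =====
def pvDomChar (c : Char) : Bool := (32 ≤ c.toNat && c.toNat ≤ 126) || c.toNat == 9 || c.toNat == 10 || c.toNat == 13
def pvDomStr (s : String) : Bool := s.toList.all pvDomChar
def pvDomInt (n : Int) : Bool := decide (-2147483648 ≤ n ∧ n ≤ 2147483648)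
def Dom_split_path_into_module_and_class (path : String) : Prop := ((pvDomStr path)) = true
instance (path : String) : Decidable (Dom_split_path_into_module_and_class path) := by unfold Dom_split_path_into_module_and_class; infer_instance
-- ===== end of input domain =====

-- B walks the raw string once as a character-level state machine (position after a '.' = component
-- start) and slices the original string, instead of A's split-then-accumulate-components loop:
-- alternative decomposition, same cost. Return-value equivalence only; neither mutates its argument.
-- Pre_ excludes paths where an empty '.'-component is reached before any uppercase-starting
-- component: there Python A raises IndexError on part[0].


-- ===== PORT A =====
-- the loop: for i, part in enumerate(path): if part[0].isupper(): classes = path[i:]; break / else module.append(part)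
-- part[0] is PySem.Str.pyGet? p 0; the `none` branch is Python's IndexError, excluded by Pre_
def pvGoA : List String → List String → String × List String
  | [], acc => (PySem.Str.join "." acc, [])
  | p :: rest, acc =>
    match PySem.Str.pyGet? p 0 with
    | none => ("", [])  -- Python: IndexError (outside Pre_)
    | some c => if PySem.Chars.isupper c then (PySem.Str.join "." acc, p :: rest)
                else pvGoA rest (acc ++ [p])

-- path.split('.'): sep is non-empty, so split? is always `some`
def split_path_into_module_and_class (path : String) : String × List String :=
  pvGoA ((PySem.Str.split? path ".").getD []) []

-- ===== PORT B =====
-- the loop of Source B: at_start = True; for j, ch in enumerate(path): if ch.isupper() and at_start: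
--   return (path[:j-1] if j else ''), path[j:].split('.'); at_start = ch == '.'
def pvScanB : List Char → Nat → Bool → Option Nat
  | [], _, _ => none
  | c :: rest, j, atStart =>
    if PySem.Chars.isupper c && atStart then some j
    else pvScanB rest (j + 1) (c == '.')

-- path[:j-1] (j ≥ 1 here) and path[j:] are slices with nonnegative in-range bounds: exactly take/drop
def split_path_into_module_and_class_alt (path : String) : String × List String :=
  match pvScanB path.toList 0 true with
  | some j =>
    ((if j = 0 then "" else String.ofList (path.toList.take (j - 1))),
     (PySem.Str.split? (String.ofList (path.toList.drop j)) ".").getD [])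
  | none => (path, [])

-- ===== PRECONDITION & SPEC =====
-- A's scan continues through components that are nonempty and start with a non-uppercase char
def pvCont (p : String) : Bool :=
  match PySem.Str.pyGet? p 0 with
  | none => false
  | some c => !(PySem.Chars.isupper c)

-- Pre_ excludes exactly the paths on which Python A raises IndexError: those where the first
-- '.'-component that is empty or uppercase-starting is EMPTY (the scan evaluates part[0] there).
def Pre_split_path_into_module_and_class (path : String) : Prop :=
  ((((PySem.Str.split? path ".").getD []).dropWhile pvCont).headD ".") ≠ ""
instance (path : String) : Decidable (Pre_split_path_into_module_and_class path) := by
  unfold Pre_split_path_into_module_and_class; infer_instance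

def pvWitness_split_path_into_module_and_class : String := "deepomatic.oef.Model"

def Spec_split_path_into_module_and_class (path : String) (out : String × List String) : Prop := out = split_path_into_module_and_class_alt path
instance (path : String) (out : String × List String) : Decidable (Spec_split_path_into_module_and_class path out) := by unfold Spec_split_path_into_module_and_class; infer_instance

-- ===== CLAIM (what is proved, stated in full; the proofs are below) =====
def Claim_equal_split_path_into_module_and_class : Prop := ∀ (path : String), Dom_split_path_into_module_and_class path → Pre_split_path_into_module_and_class path → Spec_split_path_into_module_and_class path (split_path_into_module_and_class path)

-- ===== LEMMAS AND PROOFS =====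

-- structural model of Python's s.split('.') on char lists
def pvSp : List Char → List (List Char)
  | [] => [[]]
  | c :: cs =>
    if c = '.' then [] :: pvSp cs
    else
      match pvSp cs with
      | [] => [[c]]
      | p :: ps => (c :: p) :: ps

theorem pvSp_ne_nil (cs : List Char) : pvSp cs ≠ [] := by
  cases cs with
  | nil => simp [pvSp]
  | cons c cs =>
    simp only [pvSp]
    split_ifs
    · simp
    · cases pvSp cs <;> simp

theorem pvSplitOn_go_eq (fuel : Nat) (l cur : List Char) (acc : List (List Char))
    (h : l.length ≤ fuel) :
    PySem.Chars.splitOn.go ['.'] fuel l cur acc =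
      acc.reverse ++ (match pvSp l with
        | [] => []
        | p :: ps => (cur.reverse ++ p) :: ps) := by
  induction fuel generalizing l cur acc with
  | zero =>
    have : l = [] := by cases l <;> simp_all
    subst this
    simp [PySem.Chars.splitOn.go, pvSp]
  | succ fuel ih =>
    cases l with
    | nil => simp [PySem.Chars.splitOn.go, pvSp]
    | cons c rest =>
      by_cases hc : c = '.'
      · subst hc
        have hpre : List.isPrefixOf ['.'] ('.' :: rest) = true := by simp [List.isPrefixOf]
        rw [PySem.Chars.splitOn.go]
        simp only [hpre, if_true, List.length_cons, List.length_nil, List.drop_succ_cons,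
          List.drop_zero]
        rw [ih rest [] (cur.reverse :: acc) (by simpa using Nat.le_of_succ_le_succ h)]
        simp only [pvSp, if_true]
        cases hsp : pvSp rest with
        | nil => exact absurd hsp (pvSp_ne_nil rest)
        | cons p ps => simp
      · have hpre : List.isPrefixOf ['.'] (c :: rest) = false := by
          simp [List.isPrefixOf]
          exact fun h => hc h.symm
        rw [PySem.Chars.splitOn.go]
        simp only [hpre]
        rw [if_neg (by simp)]
        rw [ih rest (c :: cur) acc (by simpa using Nat.le_of_succ_le_succ h)]
        simp only [pvSp, if_neg hc]
        cases hsp : pvSp rest with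
        | nil => exact absurd hsp (pvSp_ne_nil rest)
        | cons p ps => simp

theorem pvSplitOn_eq_sp (cs : List Char) :
    PySem.Chars.splitOn cs ['.'] = pvSp cs := by
  rw [PySem.Chars.splitOn, pvSplitOn_go_eq (cs.length + 1) cs [] [] (by omega)]
  cases hsp : pvSp cs with
  | nil => exact absurd hsp (pvSp_ne_nil cs)
  | cons p ps => simp

theorem pvSplit_eq (s : String) :
    (PySem.Str.split? s ".").getD [] = (pvSp s.toList).map String.ofList := by
  simp [PySem.Str.split?, PySem.Chars.split?, pvSplitOn_eq_sp]

theorem pvJn_sp (cs : List Char) : List.intercalate ['.'] (pvSp cs) = cs := by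
  induction cs with
  | nil => simp [pvSp, List.intercalate]
  | cons c cs ih =>
    simp only [pvSp]
    by_cases hc : c = '.'
    · subst hc
      simp only [if_true]
      cases hsp : pvSp cs with
      | nil => exact absurd hsp (pvSp_ne_nil cs)
      | cons p ps =>
        rw [hsp] at ih
        simpa [List.intercalate, List.intersperse] using ih
    · rw [if_neg hc]
      cases hsp : pvSp cs with
      | nil => exact absurd hsp (pvSp_ne_nil cs)
      | cons p ps =>
        rw [hsp] at ih
        cases ps with
        | nil => simpa [List.intercalate, List.intersperse] using ih
        | cons q t =>
          simp [List.intercalate, List.intersperse] at ih ⊢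
          simpa using ih

-- parts-level pivot / continue predicates on char lists
def pvPivot (p : String) : Bool := (PySem.Str.pyGet? p 0).any PySem.Chars.isupper
def pvPivotC (p : List Char) : Bool := (p.head?.map PySem.Chars.isupper).getD false
def pvContC (p : List Char) : Bool := !p.isEmpty && !pvPivotC p

theorem pyGet?_zero_head (p : List Char) : PySem.List.pyGet? p 0 = p.head? := by
  cases p <;> simp [PySem.List.pyGet?, PySem.List.pyIdx?]

theorem pvPivot_ofList (p : List Char) : pvPivot (String.ofList p) = pvPivotC p := by
  simp [pvPivot, pvPivotC, pyGet?_zero_head]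
  cases p <;> simp

theorem pvCont_ofList (p : List Char) : pvCont (String.ofList p) = pvContC p := by
  simp only [pvCont, pvContC]
  rw [show PySem.Str.pyGet? (String.ofList p) 0 = p.head? by simp [PySem.Str.pyGet?, pyGet?_zero_head]]
  cases p <;> simp [pvPivotC]

-- A-side loop characterisation (accumulate-and-break = take/drop at the pivot index)
theorem pvGoA_eq (parts : List String)
    (hpre : (parts.dropWhile pvCont).headD "." ≠ "") (acc : List String) :
    pvGoA parts acc =
      (PySem.Str.join "." (acc ++ parts.take ((parts.findIdx? pvPivot).getD parts.length)),
       parts.drop ((parts.findIdx? pvPivot).getD parts.length)) := by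
  induction parts generalizing acc with
  | nil => simp [pvGoA]
  | cons p rest ih =>
    cases hget : PySem.Str.pyGet? p 0 with
    | none =>
      exfalso
      have hget' : PySem.List.pyGet? p.toList 0 = none := by simpa using hget
      have hcont : pvCont p = false := by simp [pvCont, hget']
      have hpe : p = "" := by
        have : p.toList = [] := by
          by_contra hne
          cases hl : p.toList with
          | nil => exact hne hl
          | cons c cs =>
            rw [hl] at hget'
            simp [PySem.List.pyGet?, PySem.List.pyIdx?] at hget'
        have h2 := congrArg String.ofList this
        simpa using h2
      rw [hpe] at hpre hcont
      simp [hcont] at hpre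
    | some c =>
      have hget' : PySem.List.pyGet? p.toList 0 = some c := by simpa using hget
      have hpiv : pvPivot p = (PySem.Chars.isupper c) := by
        simp [pvPivot, hget']
      by_cases hu : PySem.Chars.isupper c = true
      · simp only [pvGoA, hget, hu]
        simp [List.findIdx?_cons, hpiv, hu]
      · have hcont : pvCont p = true := by simp [pvCont, hget', hu]
        have hpre' : (rest.dropWhile pvCont).headD "." ≠ "" := by
          simpa [List.dropWhile_cons, hcont] using hpre
        have hrec := ih hpre' (acc ++ [p])
        simp only [pvGoA, hget, if_neg hu]
        rw [hrec]
        have hpiv' : pvPivot p = false := by simp [hpiv, hu]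
        simp only [List.findIdx?_cons, hpiv']
        cases hfi : rest.findIdx? pvPivot with
        | none => simp [List.take_succ_cons, List.drop_succ_cons]
        | some j => simp [List.take_succ_cons, List.drop_succ_cons]

-- B-side scan: shift of the start index
theorem pvScanB_shift (cs : List Char) (j : Nat) (b : Bool) :
    pvScanB cs j b = (pvScanB cs 0 b).map (j + ·) := by
  induction cs generalizing j b with
  | nil => simp [pvScanB]
  | cons c rest ih =>
    simp only [pvScanB]
    split_ifs with h
    · simp
    · rw [ih (j + 1), ih 1]
      cases pvScanB rest 0 (c == '.') <;> simp <;> omega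

-- scanning a dot-free tail with atStart = false finds nothing until the next dot
theorem pvScanB_mid (q : List Char) (cs' : List Char) (hq : '.' ∉ q) :
    pvScanB (q ++ '.' :: cs') 0 false = (pvScanB cs' 0 true).map (q.length + 1 + ·) := by
  induction q with
  | nil =>
    rw [List.nil_append, pvScanB]
    simp only [Bool.and_false, Bool.false_eq_true, if_false]
    rw [pvScanB_shift]
    simp
  | cons d q' ih =>
    have hd : d ≠ '.' := by simp at hq; exact Ne.symm hq.1
    have hq' : '.' ∉ q' := by simp at hq; exact hq.2
    rw [List.cons_append, pvScanB]
    simp only [Bool.and_false, Bool.false_eq_true, if_false]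
    rw [pvScanB_shift, show (d == '.') = false by simp [hd], ih hq']
    cases pvScanB cs' 0 true <;> simp <;> omega

-- no dot at all, atStart = false: nothing found
theorem pvScanB_nodot_false (q : List Char) (hq : '.' ∉ q) :
    pvScanB q 0 false = none := by
  induction q with
  | nil => simp [pvScanB]
  | cons d q' ih =>
    have hd : d ≠ '.' := by simp at hq; exact Ne.symm hq.1
    have hq' : '.' ∉ q' := by simp at hq; exact hq.2
    rw [pvScanB]
    simp only [Bool.and_false, Bool.false_eq_true, if_false]
    rw [pvScanB_shift, show (d == '.') = false by simp [hd], ih hq']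
    rfl

theorem pvSp_nodot (cs : List Char) (h : '.' ∉ cs) : pvSp cs = [cs] := by
  induction cs with
  | nil => simp [pvSp]
  | cons c rest ih =>
    have hc : c ≠ '.' := by simp at h; exact Ne.symm h.1
    have hrest : '.' ∉ rest := by simp at h; exact h.2
    simp only [pvSp, if_neg hc, ih hrest]

theorem pvSp_append_dot (p cs' : List Char) (hp : '.' ∉ p) :
    pvSp (p ++ '.' :: cs') = p :: pvSp cs' := by
  induction p with
  | nil => simp [pvSp]
  | cons c p' ih =>
    have hc : c ≠ '.' := by simp at hp; exact Ne.symm hp.1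
    have hp' : '.' ∉ p' := by simp at hp; exact hp.2
    simp only [List.cons_append, pvSp, if_neg hc, ih hp']

-- main correspondence: char-level scan ⇔ pivot index over the components
theorem pvDecomp (cs : List Char) (hdot : '.' ∈ cs) :
    ∃ p cs', '.' ∉ p ∧ cs = p ++ '.' :: cs' := by
  induction cs with
  | nil => simp at hdot
  | cons c rest ih =>
    by_cases hc : c = '.'
    · exact ⟨[], rest, by simp, by simp [hc]⟩
    · have hmem : '.' ∈ rest := by
        rcases List.mem_cons.mp hdot with h | h
        · exact absurd h.symm hc
        · exact h
      obtain ⟨p, cs', h1, h2⟩ := ih hmem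
      refine ⟨c :: p, cs', ?_, by simp [h2]⟩
      intro hmem2
      rcases List.mem_cons.mp hmem2 with h | h
      · exact hc h.symm
      · exact h1 h

theorem pvIntercalate_singleton (x : List Char) : List.intercalate ['.'] [x] = x := by
  simp [List.intercalate, List.intersperse]

theorem pvIntercalate_cons (x : List Char) (L : List (List Char)) (h : L ≠ []) :
    List.intercalate ['.'] (x :: L) = x ++ '.' :: List.intercalate ['.'] L := by
  cases L with
  | nil => exact absurd rfl h
  | cons q t => simp [List.intercalate, List.intersperse]

theorem pvMain (n : Nat) (cs : List Char) (hn : cs.length ≤ n)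
    (hpre : ((pvSp cs).dropWhile pvContC).headD ['.'] ≠ []) :
    match pvScanB cs 0 true with
    | none => (pvSp cs).findIdx? pvPivotC = none
    | some j => ∃ idx, (pvSp cs).findIdx? pvPivotC = some idx ∧
        pvSp (cs.drop j) = (pvSp cs).drop idx ∧
        ((j = 0 ∧ idx = 0) ∨
          (1 ≤ j ∧ 1 ≤ idx ∧ cs.take (j - 1) = List.intercalate ['.'] ((pvSp cs).take idx))) := by
  induction n generalizing cs with
  | zero =>
    have : cs = [] := by cases cs <;> simp_all
    subst this
    simp only [pvScanB, pvSp]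
    decide
  | succ n ih =>
    by_cases hdot : '.' ∈ cs
    · obtain ⟨p, cs', hp, hcs⟩ := pvDecomp cs hdot
      subst hcs
      rw [pvSp_append_dot p cs' hp] at hpre ⊢
      by_cases hpiv : pvPivotC p = true
      · -- pivot component is the first one
        obtain ⟨c, p', rfl⟩ : ∃ c p', p = c :: p' := by
          cases p with
          | nil => simp [pvPivotC] at hpiv
          | cons c p' => exact ⟨c, p', rfl⟩
        have hu : PySem.Chars.isupper c = true := by simpa [pvPivotC] using hpiv
        simp only [List.cons_append, pvScanB, hu, Bool.true_and, if_true]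
        refine ⟨0, ?_, ?_, Or.inl (by simp)⟩
        · simp [List.findIdx?_cons, hpiv]
        · exact pvSp_append_dot (c :: p') cs' hp
      · -- skip the first component
        have hpne : p ≠ [] := by
          intro hnil
          subst hnil
          simp [pvContC, pvPivotC] at hpre
        have hcont : pvContC p = true := by
          simp [pvContC, hpne, hpiv]
        have hpre' : ((pvSp cs').dropWhile pvContC).headD ['.'] ≠ [] := by
          simpa [List.dropWhile_cons, hcont] using hpre
        obtain ⟨c, p', rfl⟩ : ∃ c p', p = c :: p' := by
          cases p with
          | nil => exact absurd rfl hpne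
          | cons c p' => exact ⟨c, p', rfl⟩
        have hu : PySem.Chars.isupper c = false := by
          by_contra h
          simp [pvPivotC] at hpiv
          simp_all
        have hc : c ≠ '.' := by simp at hp; exact Ne.symm hp.1
        have hp' : '.' ∉ p' := by simp at hp; exact hp.2
        have hstep : pvScanB ((c :: p') ++ '.' :: cs') 0 true
            = (pvScanB cs' 0 true).map ((c :: p').length + 1 + ·) := by
          rw [List.cons_append, pvScanB]
          simp only [hu, Bool.false_and, Bool.false_eq_true, if_false]
          rw [pvScanB_shift, show (c == '.') = false by simp [hc], pvScanB_mid p' cs' hp']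
          cases pvScanB cs' 0 true <;> simp <;> omega
        have hlen : cs'.length ≤ n := by
          have h2 : ((c :: p') ++ '.' :: cs').length = p'.length + cs'.length + 2 := by
            simp [List.length_append]
            omega
          rw [h2] at hn
          omega
        have hIH := ih cs' hlen hpre'
        rw [hstep]
        cases hscan : pvScanB cs' 0 true with
        | none =>
          rw [hscan] at hIH
          simp only [Option.map_none]
          simp [List.findIdx?_cons, hpiv, hIH]
        | some j' =>
          rw [hscan] at hIH
          obtain ⟨idx', hfind, hdrop, hrel⟩ := hIH
          simp only [Option.map_some]
          refine ⟨idx' + 1, ?_, ?_, ?_⟩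
          · simp [List.findIdx?_cons, hpiv, hfind]
          · have e1 : (c :: p').drop ((c :: p').length + 1 + j') = [] :=
              List.drop_eq_nil_of_le (by omega)
            have e2 : (c :: p').length + 1 + j' - (c :: p').length = j' + 1 := by omega
            rw [List.drop_append, e1, e2, List.nil_append, List.drop_succ_cons, hdrop,
              List.drop_succ_cons]
          · right
            refine ⟨by omega, by omega, ?_⟩
            have hlen1 : (c :: p').length + 1 + j' - 1 = (c :: p').length + j' := by
              omega
            rw [hlen1]
            rcases hrel with ⟨hj0, hi0⟩ | ⟨hj1, hi1, htake⟩
            · subst hj0; subst hi0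
              have e2 : (c :: p').length + 0 - (c :: p').length = 0 := by omega
              rw [List.take_append, e2, List.take_zero, List.append_nil,
                show (c :: p').length + 0 = (c :: p').length from rfl, List.take_length,
                List.take_succ_cons, List.take_zero, pvIntercalate_singleton]
            · have hne : (pvSp cs').take idx' ≠ [] := by
                have := pvSp_ne_nil cs'
                cases hsp : pvSp cs' with
                | nil => exact absurd hsp this
                | cons q t =>
                  cases idx' with
                  | zero => omega
                  | succ k => simp
              have e2 : (c :: p').length + j' - (c :: p').length = j' := by omega
              have e3 : (c :: p').take ((c :: p').length + j') = c :: p' :=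
                List.take_of_length_le (Nat.le_add_right _ _)
              rw [List.take_append, e2, e3, List.take_succ_cons,
                pvIntercalate_cons _ _ hne,
                show j' = j' - 1 + 1 from by omega, List.take_succ_cons, htake]
    · -- no dot: a single component
      rw [pvSp_nodot cs hdot] at hpre ⊢
      cases cs with
      | nil => simp [pvContC, pvPivotC] at hpre
      | cons c rest =>
        by_cases hu : PySem.Chars.isupper c = true
        · simp only [pvScanB, hu, Bool.true_and, if_true]
          refine ⟨0, ?_, ?_, Or.inl (by simp)⟩
          · simp [List.findIdx?_cons, pvPivotC, hu]
          · simp [pvSp_nodot _ hdot]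
        · have hc : c ≠ '.' := by simp at hdot; exact Ne.symm hdot.1
          have hrest : '.' ∉ rest := by simp at hdot; exact hdot.2
          rw [pvScanB]
          simp only [hu, Bool.false_and, Bool.false_eq_true, if_false]
          rw [pvScanB_shift, show (c == '.') = false by simp [hc], pvScanB_nodot_false rest hrest]
          simp [List.findIdx?_cons, pvPivotC, hu]

-- join over map ofList = ofList of the intercalation
theorem pvJoin_map (L : List (List Char)) :
    PySem.Str.join "." (L.map String.ofList) = String.ofList (List.intercalate ['.'] L) := by
  simp [PySem.Str.join, PySem.Chars.join, List.map_map, Function.comp_def, String.toList_ofList]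

-- ===== VERDICT (by name: the statement is the Claim_ definition above) =====
theorem split_path_into_module_and_class_spec : Claim_equal_split_path_into_module_and_class := by
  intro path _ hpre
  unfold Spec_split_path_into_module_and_class split_path_into_module_and_class
    split_path_into_module_and_class_alt
  unfold Pre_split_path_into_module_and_class at hpre
  rw [pvSplit_eq] at hpre ⊢
  have hmapdw : (List.map String.ofList (pvSp path.toList)).dropWhile pvCont
      = ((pvSp path.toList).dropWhile pvContC).map String.ofList := by
    rw [List.dropWhile_map, show (pvCont ∘ String.ofList) = pvContC from funext pvCont_ofList]
  have hpreC : ((pvSp path.toList).dropWhile pvContC).headD ['.'] ≠ [] := by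
    rw [hmapdw] at hpre
    cases h : (pvSp path.toList).dropWhile pvContC with
    | nil => simp
    | cons q t =>
      rw [h] at hpre
      simp only [List.map_cons, List.headD_cons] at hpre ⊢
      intro hq
      subst hq
      exact hpre rfl
  rw [pvGoA_eq (List.map String.ofList (pvSp path.toList)) hpre []]
  have hfi : (List.map String.ofList (pvSp path.toList)).findIdx? pvPivot
      = (pvSp path.toList).findIdx? pvPivotC := by
    rw [List.findIdx?_map, show (pvPivot ∘ String.ofList) = pvPivotC from funext pvPivot_ofList]
  have hM := pvMain path.toList.length path.toList (le_refl _) hpreC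
  cases hscan : pvScanB path.toList 0 true with
  | none =>
    rw [hscan] at hM
    simp only [hfi, hM, Option.getD_none, List.nil_append]
    rw [List.take_length, List.drop_length, pvJoin_map, pvJn_sp, String.ofList_toList]
  | some j =>
    rw [hscan] at hM
    obtain ⟨idx, hfind, hdrop, hrel⟩ := hM
    simp only [hfi, hfind, Option.getD_some, List.nil_append]
    have hclasses : (PySem.Str.split? (String.ofList (path.toList.drop j)) ".").getD []
        = (List.map String.ofList (pvSp path.toList)).drop idx := by
      rw [pvSplit_eq]
      simp only [String.toList_ofList]
      rw [hdrop, List.map_drop]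
    rw [hclasses]
    rcases hrel with ⟨hj0, hi0⟩ | ⟨hj1, _, htake⟩
    · subst hj0; subst hi0
      simp only [if_true, List.take_zero]
      rfl
    · rw [if_neg (by omega)]
      rw [← List.map_take, pvJoin_map, htake]
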